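-- pv_equiv track=rewrite | github.com/NielsOerbaek/basal-app | apps/schools/migrations/0037_backfill_kommune_billing.py | _pick_canonical
-- ===== SOURCE A (Python) =====
-- from collections import Counter
--
-- def _pick_canonical(values):
--     cleaned = [v.strip() for v in values if v and v.strip()]
--     if not cleaned:
--         return ""
--     counter = Counter(cleaned)
--     most_common_count = counter.most_common(1)[0][1]
--     candidates = [v for v, n in counter.items() if n == most_common_count]
--     candidates.sort(key=lambda v: (-len(v), v))
--     return candidates[0]
-- ===== SOURCE B (Python) =====
-- from collections import Counter
--
-- def _pick_canonical(values):
--     cleaned = [v.strip() for v in values if v and v.strip()]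
--     if not cleaned:
--         return ""
--     # single pass: most common, ties broken by longer, then lexicographically smaller
--     return min(Counter(cleaned).items(), key=lambda kv: (-kv[1], -len(kv[0]), kv[0]))[0]
-- ===== Notes on version B (the rewrite author's own statement) =====
-- stated objective: simpler
-- what changed: Replaces A's most_common(1) pass, candidate-filter pass and candidate sort by a single min() over the Counter items with the composite key (-count, -len, word).
import Mathlib
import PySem

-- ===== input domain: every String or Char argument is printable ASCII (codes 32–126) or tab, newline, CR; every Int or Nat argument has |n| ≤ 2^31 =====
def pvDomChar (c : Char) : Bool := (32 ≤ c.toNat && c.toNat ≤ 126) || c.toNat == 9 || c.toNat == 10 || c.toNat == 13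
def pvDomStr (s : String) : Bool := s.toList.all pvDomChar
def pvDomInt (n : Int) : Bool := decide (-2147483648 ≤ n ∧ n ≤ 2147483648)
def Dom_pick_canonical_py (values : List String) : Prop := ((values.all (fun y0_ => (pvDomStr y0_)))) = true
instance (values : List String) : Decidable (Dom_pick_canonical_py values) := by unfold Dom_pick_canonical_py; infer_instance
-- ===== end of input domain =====

-- B replaces A's most_common(1) pass + candidate filter + candidate sort by one min() over the
-- Counter items with the composite key (-count, -len(word), word); objective: simpler.

-- ===== PORT A =====
def pick_canonical_py (values : List String) : String :=
  let cleaned := (values.filter (fun v => decide (v ≠ "") && decide (PySem.Str.strip v ≠ ""))).map PySem.Str.strip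
  if cleaned = [] then ""
  else
    let counter := PySem.Dict.counter cleaned
    -- most_common(1)[0][1]: the maximal count (items is provably nonempty here, so max? is some)
    let most_common_count :=
      match PySem.List.max? counter.items (fun kv => kv.2) with
      | some kv => kv.2
      | none => 0
    let candidates := (counter.items.filter (fun kv => kv.2 == most_common_count)).map (fun kv => kv.1)
    -- candidates.sort(key=lambda v: (-len(v), v)); candidates[0] (provably nonempty)
    (PySem.List.sorted2 candidates (fun v => -(PySem.Str.len v)) (fun v => v)).headD ""

-- ===== PORT B =====
-- Python's '<' on the 3-tuple key (-count, -len(word), word): componentwise lexicographic (exact)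
def pvKeyLt_pick (a b : Int × Int × String) : Bool :=
  decide (a.1 < b.1) || (decide (a.1 = b.1) &&
    (decide (a.2.1 < b.2.1) || (decide (a.2.1 = b.2.1) && decide (a.2.2 < b.2.2))))

def pick_canonical_py_alt (values : List String) : String :=
  let cleaned := (values.filter (fun v => decide (v ≠ "") && decide (PySem.Str.strip v ≠ ""))).map PySem.Str.strip
  if cleaned = [] then ""
  else
    -- min(counter.items(), key=lambda kv: (-kv[1], -len(kv[0]), kv[0]))[0]:
    -- Python's min keeps the FIRST minimum — ported as a fold from the first item (items nonempty here)
    match (PySem.Dict.counter cleaned).items with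
    | [] => ""  -- unreachable: cleaned ≠ []
    | kv :: rest =>
      (rest.foldl (fun best x =>
        if pvKeyLt_pick (-x.2, -(PySem.Str.len x.1), x.1) (-best.2, -(PySem.Str.len best.1), best.1)
        then x else best) kv).1

-- ===== PRECONDITION & SPEC =====
def Spec_pick_canonical_py (values : List String) (out : String) : Prop := out = pick_canonical_py_alt values
instance (values : List String) (out : String) : Decidable (Spec_pick_canonical_py values out) := by unfold Spec_pick_canonical_py; infer_instance

-- ===== CLAIM (what is proved, stated in full; the proofs are below) =====
def Claim_equal_pick_canonical_py : Prop := ∀ (values : List String), Dom_pick_canonical_py values → Spec_pick_canonical_py values (pick_canonical_py values)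

-- ===== LEMMAS AND PROOFS =====

-- the composite key as a lexicographic value (proof-side only)
def pvK2 (v : String) : Lex (Int × String) := toLex (-(PySem.Str.len v), v)
def pvK (p : String × Int) : Lex (Int × Lex (Int × String)) := toLex (-p.2, pvK2 p.1)

theorem pvKeyLt_pick_eq (a b : Int × Int × String) :
    pvKeyLt_pick a b = decide (toLex (a.1, toLex a.2) < toLex (b.1, toLex b.2)) := by
  apply Bool.eq_iff_iff.mpr
  simp only [pvKeyLt_pick, Bool.or_eq_true, Bool.and_eq_true, decide_eq_true_eq,
    Prod.Lex.lt_iff, ofLex_toLex]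

theorem pvLexAux {α β : Type} [LinearOrder α] [LT β] (x y : α) (a b : β) :
    (x < y ∨ (¬ y < x ∧ a < b)) ↔ (x < y ∨ (x = y ∧ a < b)) := by
  constructor
  · rintro (hxy | ⟨hnyx, hab⟩)
    · exact Or.inl hxy
    · rcases lt_or_eq_of_le (not_lt.mp hnyx) with h | h
      · exact Or.inl h
      · exact Or.inr ⟨h, hab⟩
  · rintro (hxy | ⟨heq, hab⟩)
    · exact Or.inl hxy
    · exact Or.inr ⟨by rw [heq]; exact lt_irrefl y, hab⟩

theorem pvSorted2_eq (C : List String) :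
    PySem.List.sorted2 C (fun v => -(PySem.Str.len v)) (fun v => v) =
    PySem.List.sorted C pvK2 := by
  rw [PySem.List.sorted_eq_foldl_insertBy]
  unfold PySem.List.sorted2
  dsimp only
  show List.foldl (fun acc x => PySem.List.insertBy (fun a b =>
      decide (-(PySem.Str.len a) < -(PySem.Str.len b)) ||
      (!decide (-(PySem.Str.len b) < -(PySem.Str.len a)) && decide (a < b))) x acc) [] C =
    List.foldl (fun acc x => PySem.List.insertBy (fun a b => decide (pvK2 a < pvK2 b)) x acc) [] C
  congr 1
  funext acc x
  congr 1
  funext a b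
  apply Bool.eq_iff_iff.mpr
  simp only [Bool.or_eq_true, Bool.and_eq_true, Bool.not_eq_true', decide_eq_true_eq,
    decide_eq_false_iff_not, pvK2, Prod.Lex.lt_iff, ofLex_toLex]
  exact pvLexAux _ _ _ _

-- B's fold, with its key comparison read as the lexicographic order pvK
theorem pvStepFun_eq :
    (fun (best x : String × Int) =>
      if pvKeyLt_pick (-x.2, -(PySem.Str.len x.1), x.1) (-best.2, -(PySem.Str.len best.1), best.1)
      then x else best) =
    (fun (best x : String × Int) => if pvK x < pvK best then x else best) := by
  funext best x
  rw [pvKeyLt_pick_eq]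
  simp only [decide_eq_true_eq]
  exact if_congr Iff.rfl rfl rfl

theorem pvFoldB_eq (rest : List (String × Int)) (kv : String × Int) :
    (rest.foldl (fun best x =>
        if pvKeyLt_pick (-x.2, -(PySem.Str.len x.1), x.1) (-best.2, -(PySem.Str.len best.1), best.1)
        then x else best) kv) =
    rest.foldl (fun best x => if pvK x < pvK best then x else best) kv := by
  rw [pvStepFun_eq]

-- the first-minimum fold returns a member that pvK-minimizes the whole list
theorem pvFold_min (rest : List (String × Int)) (kv : String × Int) :
    (rest.foldl (fun best x => if pvK x < pvK best then x else best) kv) ∈ kv :: rest ∧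
    ∀ y ∈ kv :: rest,
      pvK (rest.foldl (fun best x => if pvK x < pvK best then x else best) kv) ≤ pvK y := by
  induction rest generalizing kv with
  | nil =>
    simp only [List.foldl_nil]
    exact ⟨List.mem_singleton.mpr rfl,
      fun y hy => le_of_eq (by rw [List.mem_singleton.mp hy])⟩
  | cons x rest ih =>
    simp only [List.foldl_cons]
    obtain ⟨hmem, hmin⟩ := ih (if pvK x < pvK kv then x else kv)
    constructor
    · rcases List.mem_cons.mp hmem with h | h
      · split at h <;> rename_i hc
        · rw [if_pos hc, h]; simp
        · rw [if_neg hc, h]; simp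
      · simp [h]
    · intro y hy
      rcases List.mem_cons.mp hy with h | hy'
      · subst h
        refine le_trans (hmin _ (List.mem_cons_self ..)) ?_
        split
        · exact le_of_lt (by assumption)
        · exact le_refl _
      · rcases List.mem_cons.mp hy' with h | h
        · subst h
          refine le_trans (hmin _ (List.mem_cons_self ..)) ?_
          split
          · exact le_refl _
          · exact not_lt.mp (by assumption)
        · exact hmin _ (List.mem_cons_of_mem _ h)

theorem pvK_injective : Function.Injective pvK := by
  intro p q h
  simp only [pvK, pvK2] at h
  have h' := congrArg ofLex h
  simp only [ofLex_toLex, Prod.mk.injEq] at h'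
  obtain ⟨h1, h2⟩ := h'
  have h2' := congrArg ofLex h2
  simp only [ofLex_toLex, Prod.mk.injEq] at h2'
  exact Prod.ext h2'.2 (by omega)

-- ===== VERDICT (by name: the statement is the Claim_ definition above) =====
theorem pick_canonical_py_spec : Claim_equal_pick_canonical_py := by
  intro values _
  unfold Spec_pick_canonical_py pick_canonical_py pick_canonical_py_alt
  set cleaned := (values.filter (fun v => decide (v ≠ "") && decide (PySem.Str.strip v ≠ ""))).map PySem.Str.strip with hcl
  by_cases hc : cleaned = []
  · simp [hc]
  · simp only [if_neg hc]
    -- the item list is nonempty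
    have hne : (PySem.Dict.counter cleaned).items ≠ [] := by
      rw [PySem.Dict.items_counter]
      rcases List.exists_mem_of_ne_nil cleaned hc with ⟨c, hcmem⟩
      have hmem : c ∈ PySem.Set.ofList cleaned := by
        rw [PySem.Set.mem_ofList]; exact hcmem
      intro h
      rw [List.map_eq_nil_iff] at h
      rw [h] at hmem
      simp at hmem
    set L := (PySem.Dict.counter cleaned).items with hLdef
    obtain ⟨kv, rest, hL⟩ := List.exists_cons_of_ne_nil hne
    -- A side: the max count
    obtain ⟨mx, hmax⟩ : ∃ mx, PySem.List.max? L (fun kv => kv.2) = some mx := by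
      cases h : PySem.List.max? L (fun kv => kv.2) with
      | none => rw [PySem.List.max?_eq_none_iff] at h; exact absurd h hne
      | some mx => exact ⟨mx, rfl⟩
    rw [hmax]
    set M := mx.2 with hM
    set C := (L.filter (fun kv => kv.2 == M)).map (fun kv => kv.1) with hC
    have hCne : C ≠ [] := by
      have hmx_mem : mx ∈ L := PySem.List.max?_mem hmax
      have hmxC : mx.1 ∈ C := by
        rw [hC]
        exact List.mem_map_of_mem (List.mem_filter.mpr ⟨hmx_mem, by simp [hM]⟩)
      intro h
      rw [h] at hmxC
      simp at hmxC
    rw [pvSorted2_eq]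
    obtain ⟨m, t, hst⟩ : ∃ m t, PySem.List.sorted C pvK2 = m :: t := by
      cases h : PySem.List.sorted C pvK2 with
      | nil => exact absurd ((PySem.List.sorted_eq_nil_iff C pvK2 false).mp h) hCne
      | cons m t => exact ⟨m, t, rfl⟩
    rw [hst]
    simp only [List.headD_cons]
    -- m is a pvK2-minimal candidate
    have hmmin : ∀ c ∈ C, pvK2 m ≤ pvK2 c := PySem.List.key_head_sorted_le C pvK2 hst
    have hmC : m ∈ C := by
      have hm : m ∈ PySem.List.sorted C pvK2 := by rw [hst]; exact List.mem_cons_self ..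
      exact (PySem.List.mem_sorted C pvK2 false m).mp hm
    -- so some pair (m, M) is in L, and its pvK is minimal over all of L
    obtain ⟨p, hpL, hp1⟩ : ∃ p, (p ∈ L ∧ p.2 = M) ∧ p.1 = m := by
      rw [hC] at hmC
      rcases List.mem_map.mp hmC with ⟨p, hp, hp1⟩
      rcases List.mem_filter.mp hp with ⟨hpL, hpM⟩
      exact ⟨p, ⟨hpL, by simpa using hpM⟩, hp1⟩
    have hple : ∀ y ∈ L, pvK p ≤ pvK y := by
      intro y hy
      have hyle : y.2 ≤ M := PySem.List.max?_isMax hmax y hy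
      rcases eq_or_lt_of_le hyle with heq | hlt
      · -- y has the max count, so y.1 is a candidate
        have hyC : y.1 ∈ C := by
          rw [hC]; exact List.mem_map_of_mem (List.mem_filter.mpr ⟨hy, by simp [heq]⟩)
        have hle2 := hmmin y.1 hyC
        rw [← hp1] at hle2
        rw [Prod.Lex.le_iff] at hle2
        simp only [pvK, hpL.2, heq, Prod.Lex.le_iff, ofLex_toLex]
        exact Or.inr ⟨trivial, hle2⟩
      · simp only [pvK, hpL.2, Prod.Lex.le_iff, ofLex_toLex]
        exact Or.inl (by omega)
    -- B side: the fold result is also a pvK-minimal member of L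
    rw [hL]
    simp only []
    rw [pvFoldB_eq]
    obtain ⟨hrmem, hrmin⟩ := pvFold_min rest kv
    have hpr : p = rest.foldl (fun best x => if pvK x < pvK best then x else best) kv := by
      apply pvK_injective
      refine le_antisymm (hple _ (by rw [hL]; exact hrmem)) (hrmin p (by rw [← hL]; exact hpL.1))
    rw [← hpr, hp1]
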